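-- pv_equiv track=rewrite | github.com/M4ssino/Lab-3 | lab3.py | schet
-- ===== SOURCE A (Python) =====
-- from string import ascii_uppercase
--
-- def schet(key_element):
--     alpha = f'{ascii_uppercase}0123456789'
--     k = 0
--     for character_position, current_character in enumerate(alpha, 1):
--         for i in key_element.replace('-', ''):
--             if i.isdigit():
--                 character_position += int(i)
--             elif current_character == i:
--                 k += character_position
--     return k
-- ===== SOURCE B (Python) =====
-- def schet(key_element):
--     k = 0
--     prefix = 0
--     for ch in key_element:
--         if ch.isdigit():
--             prefix += int(ch)
--         elif 'A' <= ch <= 'Z':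
--             k += ord(ch) - 64 + prefix
--     return k
-- ===== Notes on version B (the rewrite author's own statement) =====
-- stated objective: faster
-- what changed: A scans the key 36 times (once per character of 'A..Z0..9', re-deriving the digit offsets each pass); B makes a single pass keeping a running digit-sum prefix and computing a letter's alphabet position directly from its char code.
import Mathlib
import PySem

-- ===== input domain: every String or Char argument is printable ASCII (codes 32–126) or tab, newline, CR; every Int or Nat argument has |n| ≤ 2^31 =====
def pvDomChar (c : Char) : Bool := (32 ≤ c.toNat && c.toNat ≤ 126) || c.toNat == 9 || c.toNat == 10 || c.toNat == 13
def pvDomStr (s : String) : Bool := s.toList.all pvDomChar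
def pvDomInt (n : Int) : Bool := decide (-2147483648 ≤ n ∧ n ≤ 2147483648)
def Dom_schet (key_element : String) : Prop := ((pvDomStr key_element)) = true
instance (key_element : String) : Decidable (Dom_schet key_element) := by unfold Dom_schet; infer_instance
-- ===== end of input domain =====

-- B replaces A's 36 passes over the key (one per alphabet character, each re-tracking the digit offsets)
-- by a single pass that keeps a running digit-sum prefix and reads a letter's position off its char code.

-- ===== PORT A =====
-- alpha = ascii_uppercase + '0123456789' (the f-string literal, as a char-list literal)
def alphaList : List Char :=
  ['A','B','C','D','E','F','G','H','I','J','K','L','M','N','O','P','Q','R','S','T','U','V','W','X','Y','Z',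
   '0','1','2','3','4','5','6','7','8','9']

-- int(i) is only reached when i.isdigit(); on an ASCII digit (all of Dom) it equals code − 48, exact there.
def schet (key_element : String) : Int :=
  (PySem.List.enumerate alphaList 1).foldl (fun k pc =>
    ((PySem.Str.replace key_element "-" "").toList.foldl
      (fun st i =>
        if PySem.Chars.isdigit i then (st.1 + ((i.toNat : Int) - 48), st.2)
        else if pc.2 == i then (st.1, st.2 + st.1)
        else st)
      (pc.1, k)).2) 0

-- ===== PORT B =====
-- state = (k, prefix); 'A' <= ch <= 'Z' is a code-point comparison, ord(ch) - 64 the position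
def schet_alt (key_element : String) : Int :=
  (key_element.toList.foldl
    (fun st ch =>
      if PySem.Chars.isdigit ch then (st.1, st.2 + ((ch.toNat : Int) - 48))
      else if 'A' ≤ ch ∧ ch ≤ 'Z' then (st.1 + (((ch.toNat : Int) - 64) + st.2), st.2)
      else st)
    (0, 0)).1

-- ===== PRECONDITION & SPEC =====
def Spec_schet (key_element : String) (out : Int) : Prop := out = schet_alt key_element
instance (key_element : String) (out : Int) : Decidable (Spec_schet key_element out) := by unfold Spec_schet; infer_instance

-- ===== CLAIM (what is proved, stated in full; the proofs are below) =====
def Claim_equal_schet : Prop := ∀ (key_element : String), Dom_schet key_element → Spec_schet key_element (schet key_element)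

-- ===== LEMMAS AND PROOFS =====

theorem char_beq_toNat (c i : Char) : (c == i) = (c.toNat == i.toNat) := by
  rcases eq_or_ne c i with h | h
  · subst h; simp
  · have hn : c.toNat ≠ i.toNat := fun hn => h (Char.ext (UInt32.toNat_inj.mp hn))
    simp [h, hn]

theorem char_le_toNat (c i : Char) : (c ≤ i) ↔ c.toNat ≤ i.toNat := by
  simp only [Char.le_def, UInt32.le_iff_toNat_le]; exact Iff.rfl

theorem isdigit_toNat (i : Char) :
    PySem.Chars.isdigit i = (decide (48 ≤ i.toNat) && decide (i.toNat ≤ 57)) := by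
  simp only [PySem.Chars.isdigit, Char.le_def, UInt32.le_iff_toNat_le]; rfl

-- A's inner loop as a function: running position p, sum of the matches' positions
def S (c : Char) : Int → List Char → Int
  | _, [] => 0
  | p, i :: t =>
    if PySem.Chars.isdigit i then S c (p + ((i.toNat : Int) - 48)) t
    else if c == i then p + S c p t
    else S c p t

-- B's loop as a function: running digit prefix off, sum of (position + prefix) at the uppercase letters
def Bk : Int → List Char → Int
  | _, [] => 0
  | off, ch :: t =>
    if PySem.Chars.isdigit ch then Bk (off + ((ch.toNat : Int) - 48)) t
    else if 'A' ≤ ch ∧ ch ≤ 'Z' then (((ch.toNat : Int) - 64) + off) + Bk off t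
    else Bk off t

theorem innerA (c : Char) (l : List Char) : ∀ (p k : Int),
    (l.foldl (fun st i =>
        if PySem.Chars.isdigit i then (st.1 + ((i.toNat : Int) - 48), st.2)
        else if c == i then (st.1, st.2 + st.1)
        else st) (p, k)).2 = k + S c p l := by
  induction l with
  | nil => intro p k; simp [S]
  | cons i t ih =>
    intro p k
    rw [List.foldl_cons]
    by_cases hd : PySem.Chars.isdigit i = true
    · rw [show (if PySem.Chars.isdigit i then ((p + ((i.toNat : Int) - 48), k) : Int × Int)
          else if c == i then (p, k + p) else (p, k)) = (p + ((i.toNat : Int) - 48), k) from by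
            rw [if_pos hd], ih, S, if_pos hd]
    · by_cases hm : (c == i) = true
      · rw [show (if PySem.Chars.isdigit i then ((p + ((i.toNat : Int) - 48), k) : Int × Int)
            else if c == i then (p, k + p) else (p, k)) = (p, k + p) from by
              rw [if_neg (by simp [hd]), if_pos hm], ih, S, if_neg (by simp [hd]), if_pos hm]
        ring
      · rw [show (if PySem.Chars.isdigit i then ((p + ((i.toNat : Int) - 48), k) : Int × Int)
            else if c == i then (p, k + p) else (p, k)) = (p, k) from by
              rw [if_neg (by simp [hd]), if_neg (by simp [hm])], ih, S, if_neg (by simp [hd]),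
          if_neg (by simp [hm])]

theorem innerB (l : List Char) : ∀ (k off : Int),
    (l.foldl (fun st ch =>
        if PySem.Chars.isdigit ch then (st.1, st.2 + ((ch.toNat : Int) - 48))
        else if 'A' ≤ ch ∧ ch ≤ 'Z' then (st.1 + (((ch.toNat : Int) - 64) + st.2), st.2)
        else st) (k, off)).1 = k + Bk off l := by
  induction l with
  | nil => intro k off; simp [Bk]
  | cons ch t ih =>
    intro k off
    rw [List.foldl_cons]
    by_cases hd : PySem.Chars.isdigit ch = true
    · rw [show (if PySem.Chars.isdigit ch then ((k, off + ((ch.toNat : Int) - 48)) : Int × Int)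
          else if 'A' ≤ ch ∧ ch ≤ 'Z' then (k + (((ch.toNat : Int) - 64) + off), off) else (k, off))
            = (k, off + ((ch.toNat : Int) - 48)) from by rw [if_pos hd], ih, Bk, if_pos hd]
    · by_cases hu : 'A' ≤ ch ∧ ch ≤ 'Z'
      · rw [show (if PySem.Chars.isdigit ch then ((k, off + ((ch.toNat : Int) - 48)) : Int × Int)
            else if 'A' ≤ ch ∧ ch ≤ 'Z' then (k + (((ch.toNat : Int) - 64) + off), off) else (k, off))
              = (k + (((ch.toNat : Int) - 64) + off), off) from by
                rw [if_neg (by simp [hd]), if_pos hu], ih, Bk, if_neg (by simp [hd]), if_pos hu]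
        ring
      · rw [show (if PySem.Chars.isdigit ch then ((k, off + ((ch.toNat : Int) - 48)) : Int × Int)
            else if 'A' ≤ ch ∧ ch ≤ 'Z' then (k + (((ch.toNat : Int) - 64) + off), off) else (k, off))
              = (k, off) from by rw [if_neg (by simp [hd]), if_neg hu], ih, Bk,
          if_neg (by simp [hd]), if_neg hu]

theorem sum_map_add' (E : List (Int × Char)) (f g : Int × Char → Int) :
    (E.map (fun pc => f pc + g pc)).sum = (E.map f).sum + (E.map g).sum := by
  induction E with
  | nil => simp
  | cons e t ih => simp [ih]; ring

theorem enum_alpha :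
    PySem.List.enumerate alphaList 1 =
      [(1,'A'),(2,'B'),(3,'C'),(4,'D'),(5,'E'),(6,'F'),(7,'G'),(8,'H'),(9,'I'),(10,'J'),
       (11,'K'),(12,'L'),(13,'M'),(14,'N'),(15,'O'),(16,'P'),(17,'Q'),(18,'R'),(19,'S'),(20,'T'),
       (21,'U'),(22,'V'),(23,'W'),(24,'X'),(25,'Y'),(26,'Z'),
       (27,'0'),(28,'1'),(29,'2'),(30,'3'),(31,'4'),(32,'5'),(33,'6'),(34,'7'),(35,'8'),(36,'9')] := by
  decide

-- the per-character contribution of the nondigit head i across the 36 alphabet entries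
theorem key_sum (i : Char) (off : Int) (hdom : pvDomChar i = true)
    (hnd : PySem.Chars.isdigit i = false) :
    ((PySem.List.enumerate alphaList 1).map
        (fun pc => if pc.2 == i then pc.1 + off else 0)).sum =
      (if 'A' ≤ i ∧ i ≤ 'Z' then ((i.toNat : Int) - 64) + off else 0) := by
  have hb : 9 ≤ i.toNat ∧ i.toNat ≤ 126 := by
    simp only [pvDomChar, Bool.or_eq_true, Bool.and_eq_true, decide_eq_true_eq, beq_iff_eq] at hdom
    omega
  have hnd' : ¬ (48 ≤ i.toNat ∧ i.toNat ≤ 57) := by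
    intro ⟨h1, h2⟩
    rw [isdigit_toNat] at hnd
    simp [h1, h2] at hnd
  have hle : ('A' ≤ i ∧ i ≤ 'Z') = (65 ≤ i.toNat ∧ i.toNat ≤ 90) := by
    rw [char_le_toNat, char_le_toNat]
    rfl
  rw [enum_alpha]
  simp only [hle]
  simp only [List.map_cons, List.map_nil, List.sum_cons, List.sum_nil, char_beq_toNat,
    show ('A').toNat = 65 from rfl,
    show ('B').toNat = 66 from rfl,
    show ('C').toNat = 67 from rfl,
    show ('D').toNat = 68 from rfl,
    show ('E').toNat = 69 from rfl,
    show ('F').toNat = 70 from rfl,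
    show ('G').toNat = 71 from rfl,
    show ('H').toNat = 72 from rfl,
    show ('I').toNat = 73 from rfl,
    show ('J').toNat = 74 from rfl,
    show ('K').toNat = 75 from rfl,
    show ('L').toNat = 76 from rfl,
    show ('M').toNat = 77 from rfl,
    show ('N').toNat = 78 from rfl,
    show ('O').toNat = 79 from rfl,
    show ('P').toNat = 80 from rfl,
    show ('Q').toNat = 81 from rfl,
    show ('R').toNat = 82 from rfl,
    show ('S').toNat = 83 from rfl,
    show ('T').toNat = 84 from rfl,
    show ('U').toNat = 85 from rfl,
    show ('V').toNat = 86 from rfl,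
    show ('W').toNat = 87 from rfl,
    show ('X').toNat = 88 from rfl,
    show ('Y').toNat = 89 from rfl,
    show ('Z').toNat = 90 from rfl,
    show ('0').toNat = 48 from rfl,
    show ('1').toNat = 49 from rfl,
    show ('2').toNat = 50 from rfl,
    show ('3').toNat = 51 from rfl,
    show ('4').toNat = 52 from rfl,
    show ('5').toNat = 53 from rfl,
    show ('6').toNat = 54 from rfl,
    show ('7').toNat = 55 from rfl,
    show ('8').toNat = 56 from rfl,
    show ('9').toNat = 57 from rfl,
    add_zero]
  obtain ⟨hb1, hb2⟩ := hb
  obtain ⟨n, hn⟩ : ∃ n, i.toNat = n := ⟨_, rfl⟩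
  rw [hn] at hb1 hb2 hnd' ⊢
  interval_cases n <;>
    first
      | (exfalso; exact hnd' (by omega))
      | (simp; try omega)

theorem main_sum (l : List Char) (hdom : ∀ c ∈ l, pvDomChar c = true) : ∀ (off : Int),
    ((PySem.List.enumerate alphaList 1).map (fun pc => S pc.2 (pc.1 + off) l)).sum = Bk off l := by
  induction l with
  | nil => intro off; simp [S, Bk, enum_alpha]
  | cons i t ih =>
    have hdt : ∀ c ∈ t, pvDomChar c = true := fun c hc => hdom c (List.mem_cons_of_mem _ hc)
    have hdi : pvDomChar i = true := hdom i (List.mem_cons_self)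
    intro off
    by_cases hd : PySem.Chars.isdigit i = true
    · have : ((PySem.List.enumerate alphaList 1).map (fun pc => S pc.2 (pc.1 + off) (i :: t))).sum
          = ((PySem.List.enumerate alphaList 1).map
              (fun pc => S pc.2 (pc.1 + (off + ((i.toNat : Int) - 48))) t)).sum := by
        apply congrArg
        apply List.map_congr_left
        intro pc _
        simp [S, hd, add_assoc]
      rw [this, ih hdt, Bk, if_pos hd]
    · have hstep : ((PySem.List.enumerate alphaList 1).map (fun pc => S pc.2 (pc.1 + off) (i :: t))).sum
          = ((PySem.List.enumerate alphaList 1).map (fun pc => S pc.2 (pc.1 + off) t)).sum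
            + ((PySem.List.enumerate alphaList 1).map
                (fun pc => if pc.2 == i then pc.1 + off else 0)).sum := by
        rw [← sum_map_add']
        apply congrArg
        apply List.map_congr_left
        intro pc _
        by_cases hm : (pc.2 == i) = true
        · simp [S, hd, hm]; ring
        · simp [S, hd, hm]
      rw [hstep, ih hdt, key_sum i off hdi (Bool.eq_false_iff.mpr hd)]
      by_cases hu : 'A' ≤ i ∧ i ≤ 'Z'
      · simp [Bk, hd, hu]; ring
      · simp [Bk, hd, hu]

-- replace(key, '-', '') removes every '-' (old is the one-char list ['-'], new is empty)
theorem replace_go_filter : ∀ (fuel : Nat) (l acc : List Char), l.length ≤ fuel →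
    PySem.Chars.replace.go ['-'] [] fuel l acc =
      acc.reverse ++ l.filter (fun c => !(c == '-')) := by
  intro fuel
  induction fuel with
  | zero =>
    intro l acc h
    cases l with
    | nil => simp [PySem.Chars.replace.go]
    | cons c t => simp at h
  | succ n ih =>
    intro l acc h
    cases l with
    | nil => simp [PySem.Chars.replace.go]
    | cons c t =>
      rw [PySem.Chars.replace.go]
      by_cases hc : c = '-'
      · subst hc
        have hp : List.isPrefixOf ['-'] ('-' :: t) = true := by simp [List.isPrefixOf]
        simp only [hp, if_pos]
        rw [ih _ _ (by simpa using Nat.le_of_succ_le_succ h)]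
        simp
      · have hp : List.isPrefixOf ['-'] (c :: t) = false := by
          simp [List.isPrefixOf, Ne.symm hc]
        simp only [hp, Bool.false_eq_true, if_false]
        rw [ih _ _ (by simpa using Nat.le_of_succ_le_succ h)]
        simp [hc]

theorem replace_filter (s : List Char) :
    PySem.Chars.replace s ['-'] [] = s.filter (fun c => !(c == '-')) := by
  rw [PySem.Chars.replace]
  simp only [List.isEmpty_cons, Bool.false_eq_true, if_false]
  exact replace_go_filter s.length s [] le_rfl

theorem Bk_filter (l : List Char) : ∀ (off : Int),
    Bk off (l.filter (fun c => !(c == '-'))) = Bk off l := by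
  induction l with
  | nil => intro off; simp
  | cons c t ih =>
    intro off
    by_cases hc : c = '-'
    · subst hc
      have h1 : PySem.Chars.isdigit '-' = false := by decide
      have h2 : ¬ ('A' ≤ '-' ∧ '-' ≤ 'Z') := by decide
      simp only [List.filter_cons, beq_self_eq_true, Bool.not_true, Bool.false_eq_true, if_false]
      rw [ih, Bk]
      simp [h1]
    · have : (!(c == '-')) = true := by simp [hc]
      simp only [List.filter_cons, this, if_pos]
      by_cases hd : PySem.Chars.isdigit c = true
      · simp [Bk, hd, ih]
      · by_cases hu : 'A' ≤ c ∧ c ≤ 'Z' <;> simp [Bk, hd, hu, ih]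

-- ===== VERDICT (by name: the statement is the Claim_ definition above) =====
theorem schet_spec : Claim_equal_schet := by
  intro key hdom
  unfold Spec_schet schet schet_alt
  have hrep : (PySem.Str.replace key "-" "").toList
      = key.toList.filter (fun c => !(c == '-')) := by
    rw [PySem.Str.toList_replace]
    have h1 : ("-" : String).toList = ['-'] := by decide
    have h2 : ("" : String).toList = [] := by decide
    rw [h1, h2, replace_filter]
  have hdoml : ∀ c ∈ key.toList.filter (fun c => !(c == '-')), pvDomChar c = true := by
    intro c hc
    have hcm : c ∈ key.toList := List.mem_of_mem_filter hc
    have hd := hdom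
    unfold Dom_schet pvDomStr at hd
    exact List.all_eq_true.mp hd c hcm
  have hcongr := PySem.List.foldl_congr_mem (PySem.List.enumerate alphaList 1)
    (fun k pc =>
      ((PySem.Str.replace key "-" "").toList.foldl
        (fun st i =>
          if PySem.Chars.isdigit i then (st.1 + ((i.toNat : Int) - 48), st.2)
          else if pc.2 == i then (st.1, st.2 + st.1)
          else st)
        (pc.1, k)).2)
    (fun k pc => k + S pc.2 pc.1 (key.toList.filter (fun c => !(c == '-'))))
    0
    (by intro acc pc _
        rw [hrep]
        exact innerA pc.2 _ pc.1 acc)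
  rw [hcongr, PySem.List.foldl_add]
  have hz : ((PySem.List.enumerate alphaList 1).map
        (fun pc => S pc.2 pc.1 (key.toList.filter (fun c => !(c == '-'))))).sum
      = ((PySem.List.enumerate alphaList 1).map
        (fun pc => S pc.2 (pc.1 + 0) (key.toList.filter (fun c => !(c == '-'))))).sum := by
    apply congrArg; apply List.map_congr_left; intro pc _; rw [add_zero]
  rw [hz, main_sum _ hdoml 0, Bk_filter, innerB]
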